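-- pv_equiv track=rewrite | github.com/waqaspathan00/menu-maker | backend/main/apps.py | cleanMenuData
-- ===== SOURCE A (Python) =====
-- def cleanMenuData(data):
--     menu_name = data["menu-name"]
--     url_menu_name = menu_name.lower()  # convert menu name to lowercase
--     url_menu_name = url_menu_name.replace(' ', '-')  # replace spaces with dashes
--
--     # remove special characters
--     special_chars = ['"', "'", ":", "#", ",", "!", "?", "@", "."]
--     for char in special_chars:
--         url_menu_name = url_menu_name.replace(char, "")
--     data['url_name'] = url_menu_name
--     return data
-- ===== SOURCE B (Python) =====
-- SPECIAL = {'"', "'", ":", "#", ",", "!", "?", "@", "."}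
--
-- def cleanMenuData(data):
--     url = data["menu-name"].lower()
--     data['url_name'] = ''.join('-' if c == ' ' else c for c in url if c not in SPECIAL)
--     return data
-- ===== Notes on version B (the rewrite author's own statement) =====
-- stated objective: simpler
-- what changed: Replaces the lowercase-then-ten-whole-string-replace-passes pipeline by a single character-level pass (filter out the nine special characters, map space to dash) joined once.
import Mathlib
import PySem

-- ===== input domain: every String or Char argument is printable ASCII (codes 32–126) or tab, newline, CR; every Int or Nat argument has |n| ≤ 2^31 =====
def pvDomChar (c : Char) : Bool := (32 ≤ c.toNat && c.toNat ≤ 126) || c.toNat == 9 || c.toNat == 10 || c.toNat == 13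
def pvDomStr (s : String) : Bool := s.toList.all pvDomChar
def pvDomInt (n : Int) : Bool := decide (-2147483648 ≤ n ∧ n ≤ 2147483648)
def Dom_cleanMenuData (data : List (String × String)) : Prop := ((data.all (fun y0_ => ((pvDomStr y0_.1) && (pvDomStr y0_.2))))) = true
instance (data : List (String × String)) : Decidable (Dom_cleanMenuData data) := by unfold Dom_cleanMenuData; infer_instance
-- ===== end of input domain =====

-- B changes the algorithm: one character-level pass instead of ten whole-string replace passes.
-- Note: Python A mutates its dict argument in place; the equivalence proved here is about the return value.

-- ===== PORT A =====
-- A's nine special characters, as one-character strings, in A's order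
def specialStrs : List String := ["\"", "'", ":", "#", ",", "!", "?", "@", "."]

def cleanMenuData (data : List (String × String)) : List (String × String) :=
  match (PySem.Dict.ofList data).get? "menu-name" with
  | none => []   -- Python raises KeyError here; excluded by Pre_
  | some menuName =>
    ((PySem.Dict.ofList data).insert "url_name"
      (specialStrs.foldl (fun s c => PySem.Str.replace s c "")
        (PySem.Str.replace (PySem.Str.lower menuName) " " "-"))).items

-- ===== PORT B =====
def specialChars : List Char := ['"', '\'', ':', '#', ',', '!', '?', '@', '.']

def cleanMenuData_alt (data : List (String × String)) : List (String × String) :=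
  match (PySem.Dict.ofList data).get? "menu-name" with
  | none => []   -- Python raises KeyError here; excluded by Pre_
  | some menuName =>
    ((PySem.Dict.ofList data).insert "url_name"
      (String.ofList ((((PySem.Str.lower menuName).toList.filter
          (fun c => !specialChars.contains c)).map
          (fun c => if c = ' ' then '-' else c))))).items

-- ===== PRECONDITION & SPEC =====
-- Pre_ excludes exactly the inputs without a "menu-name" key, on which Python A raises KeyError.
def Pre_cleanMenuData (data : List (String × String)) : Prop :=
  "menu-name" ∈ data.map Prod.fst
instance (data : List (String × String)) : Decidable (Pre_cleanMenuData data) := by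
  unfold Pre_cleanMenuData; infer_instance

def pvWitness_cleanMenuData : (List (String × String)) := [("menu-name", "My Menu! #1")]

def Spec_cleanMenuData (data : List (String × String)) (out : List (String × String)) : Prop := out = cleanMenuData_alt data
instance (data : List (String × String)) (out : List (String × String)) : Decidable (Spec_cleanMenuData data out) := by unfold Spec_cleanMenuData; infer_instance

-- ===== CLAIM (what is proved, stated in full; the proofs are below) =====
def Claim_equal_cleanMenuData : Prop := ∀ (data : List (String × String)), Dom_cleanMenuData data → Pre_cleanMenuData data → Spec_cleanMenuData data (cleanMenuData data)

-- ===== LEMMAS AND PROOFS =====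

theorem go_single (a : Char) (n : List Char) :
    ∀ (l acc : List Char) (fuel : Nat), l.length ≤ fuel →
    PySem.Chars.replace.go [a] n fuel l acc
      = acc.reverse ++ l.flatMap (fun c => if c = a then n else [c]) := by
  intro l
  induction l with
  | nil =>
    intro acc fuel _
    cases fuel <;> simp [PySem.Chars.replace.go]
  | cons c t ih =>
    intro acc fuel hf
    cases fuel with
    | zero => simp at hf
    | succ m =>
      simp only [PySem.Chars.replace.go]
      by_cases h : c = a
      · subst h
        have hp : List.isPrefixOf [c] (c :: t) = true := by
          simp [List.isPrefixOf]
        simp only [hp, if_pos]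
        rw [show List.drop [c].length (c :: t) = t from rfl]
        rw [ih (n.reverse ++ acc) m (by simpa using Nat.le_of_succ_le_succ hf)]
        simp
      · have hp : List.isPrefixOf [a] (c :: t) = false := by
          simp [List.isPrefixOf]
          intro hc; exact absurd hc.symm h
        simp only [hp, Bool.false_eq_true, if_false]
        rw [ih (c :: acc) m (by simpa using Nat.le_of_succ_le_succ hf)]
        simp [h]

theorem replace_single (s : List Char) (a : Char) (n : List Char) :
    PySem.Chars.replace s [a] n = s.flatMap (fun c => if c = a then n else [c]) := by
  rw [PySem.Chars.replace]
  simp only [List.isEmpty_cons, Bool.false_eq_true, if_false]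
  rw [go_single a n s [] s.length (le_refl _)]
  simp

theorem replace_map (s : List Char) (a b : Char) :
    PySem.Chars.replace s [a] [b] = s.map (fun c => if c = a then b else c) := by
  rw [replace_single]
  induction s with
  | nil => rfl
  | cons c t ih => by_cases h : c = a <;> simp [h, ih]

theorem replace_del (s : List Char) (a : Char) :
    PySem.Chars.replace s [a] [] = s.filter (fun c => !(c == a)) := by
  rw [replace_single]
  induction s with
  | nil => rfl
  | cons c t ih => by_cases h : c = a <;> simp [h, ih]

-- the composed nine deletion passes equal one filter by set membership
theorem nine_filters (l : List Char) :
    (specialStrs.foldl (fun s c => PySem.Str.replace s c "") (String.ofList l)).toList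
      = l.filter (fun c => !specialChars.contains c) := by
  simp only [specialStrs, List.foldl_cons, List.foldl_nil]
  simp only [PySem.Str.replace, String.toList_ofList]
  have t0 : ("\"" : String).toList = ['\"'] := rfl
  have t1 : ("'" : String).toList = ['\''] := rfl
  have t2 : (":" : String).toList = [':'] := rfl
  have t3 : ("#" : String).toList = ['#'] := rfl
  have t4 : ("," : String).toList = [','] := rfl
  have t5 : ("!" : String).toList = ['!'] := rfl
  have t6 : ("?" : String).toList = ['?'] := rfl
  have t7 : ("@" : String).toList = ['@'] := rfl
  have t8 : ("." : String).toList = ['.'] := rfl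
  have t9 : ("" : String).toList = ([] : List Char) := rfl
  simp only [t0, t1, t2, t3, t4, t5, t6, t7, t8, t9]
  simp only [replace_del]
  simp only [List.filter_filter]
  apply List.filter_congr
  intro c _
  simp only [specialChars, List.contains_cons, List.contains_nil]
  rw [Bool.eq_iff_iff]
  simp
  tauto

theorem string_eq (url0 : String) :
    (specialStrs.foldl (fun s c => PySem.Str.replace s c "")
        (PySem.Str.replace url0 " " "-"))
      = String.ofList (((url0.toList.filter (fun c => !specialChars.contains c)).map
          (fun c => if c = ' ' then '-' else c))) := by
  have h1 : PySem.Str.replace url0 " " "-"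
      = String.ofList (url0.toList.map (fun c => if c = ' ' then '-' else c)) := by
    simp only [PySem.Str.replace]
    congr 1
    have hsp : (" " : String).toList = [' '] := rfl
    have hda : ("-" : String).toList = ['-'] := rfl
    rw [hsp, hda, replace_map]
  rw [h1]
  have h3 := nine_filters (url0.toList.map (fun c => if c = ' ' then '-' else c))
  have h4 : (specialStrs.foldl (fun s c => PySem.Str.replace s c "")
      (String.ofList (url0.toList.map (fun c => if c = ' ' then '-' else c))))
      = String.ofList ((url0.toList.map (fun c => if c = ' ' then '-' else c)).filter
          (fun c => !specialChars.contains c)) := by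
    conv_lhs => rw [← String.ofList_toList (s := List.foldl (fun s c => PySem.Str.replace s c "") _ specialStrs)]
    rw [h3]
  rw [h4]
  refine congrArg String.ofList ?_
  rw [List.filter_map]
  refine congrArg (List.map _) ?_
  apply List.filter_congr
  intro c _
  by_cases h : c = ' ' <;> simp [h, specialChars, Function.comp]

-- ===== VERDICT (by name: the statement is the Claim_ definition above) =====
theorem cleanMenuData_spec : Claim_equal_cleanMenuData := by
  intro data _ _
  unfold Spec_cleanMenuData cleanMenuData cleanMenuData_alt
  cases h : (PySem.Dict.ofList data).get? "menu-name" with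
  | none => rfl
  | some menuName =>
    exact congrArg (fun s => ((PySem.Dict.ofList data).insert "url_name" s).items)
      (string_eq (PySem.Str.lower menuName))
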